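-- pv_equiv track=rewrite | github.com/YaninaSeb/Introduction_to_Python | task02/02.py | getMostRareWord
-- ===== SOURCE A (Python) =====
-- def sortWords(words):
--   words.sort(key=len)
--   return words
--
-- def getMostRareWord(words):
--   count = words.count(words[0])
--   rareWords = []
--
--   for word in words:
--     if words.count(word) < count:
--       count = words.count(word)
--
--   for word in words:
--     if words.count(word) == count:
--       rareWords.append(word)
--
--   return sortWords(rareWords)[0]
-- ===== SOURCE B (Python) =====
-- def getMostRareWord(words):
--     counts = {}
--     for word in words:
--         counts[word] = counts.get(word, 0) + 1
--     rarest = counts[words[0]]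
--     for c in counts.values():
--         if c < rarest:
--             rarest = c
--     best = None
--     for word in words:
--         if counts[word] == rarest:
--             if best is None or len(word) < len(best):
--                 best = word
--     return best
-- ===== Notes on version B (the rewrite author's own statement) =====
-- stated objective: faster
-- what changed: Replaces the repeated words.count scans (a full scan per element, three times over) and the stable sort of the rare-word list by a frequency dict built in one pass, a min over its values, and a single first-min length scan with strict '<' so the first-seen shortest wins.
import Mathlib
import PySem

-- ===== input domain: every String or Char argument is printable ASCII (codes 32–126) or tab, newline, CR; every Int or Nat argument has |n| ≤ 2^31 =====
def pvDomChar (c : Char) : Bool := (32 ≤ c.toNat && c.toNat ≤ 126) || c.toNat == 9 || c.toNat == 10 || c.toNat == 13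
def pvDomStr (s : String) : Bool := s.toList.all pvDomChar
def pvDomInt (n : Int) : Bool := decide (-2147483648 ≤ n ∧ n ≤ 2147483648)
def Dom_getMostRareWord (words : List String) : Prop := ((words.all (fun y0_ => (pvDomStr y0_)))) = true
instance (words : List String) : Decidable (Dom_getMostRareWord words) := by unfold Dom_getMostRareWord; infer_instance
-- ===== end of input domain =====

-- B replaces A's repeated full-list count scans and the stable length-sort by a one-pass
-- frequency dict, a min over its values, and a single first-min-length scan (faster).

-- ===== PORT A =====
def sortWords (words : List String) : List String :=
  PySem.List.sorted words (fun w => PySem.Str.len w) false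

def getMostRareWord (words : List String) : String :=
  let count0 := PySem.List.count words ((PySem.List.pyGet? words 0).getD "")
  let count := words.foldl (fun count word =>
      if PySem.List.count words word < count then PySem.List.count words word else count) count0
  let rareWords := words.foldl (fun acc word =>
      if PySem.List.count words word == count then acc ++ [word] else acc) []
  ((PySem.List.pyGet? (sortWords rareWords) 0).getD "")

-- ===== PORT B =====
def getMostRareWord_alt (words : List String) : String :=
  let counts := words.foldl (fun d w => d.insert w (d.getD w 0 + 1)) (PySem.Dict.empty : PySem.Dict String Int)
  let rarest0 := counts.getD ((PySem.List.pyGet? words 0).getD "") 0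
  let rarest := counts.values.foldl (fun r c => if c < r then c else r) rarest0
  let best := words.foldl (fun best w =>
      if counts.getD w 0 == rarest then
        match best with
        | none => some w
        | some v => if PySem.Str.len w < PySem.Str.len v then some w else best
      else best) none
  best.getD ""

-- ===== PRECONDITION & SPEC =====
-- Pre_ excludes only the empty list, on which the Python A raises IndexError (words[0]).
def Pre_getMostRareWord (words : List String) : Prop := words ≠ []
instance (words : List String) : Decidable (Pre_getMostRareWord words) := by unfold Pre_getMostRareWord; infer_instance
def pvWitness_getMostRareWord : List String := (["aa", "b", "aa"])
def Spec_getMostRareWord (words : List String) (out : String) : Prop := out = getMostRareWord_alt words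
instance (words : List String) (out : String) : Decidable (Spec_getMostRareWord words out) := by unfold Spec_getMostRareWord; infer_instance

-- ===== CLAIM (what is proved, stated in full; the proofs are below) =====
def Claim_equal_getMostRareWord : Prop := ∀ (words : List String), Dom_getMostRareWord words → Pre_getMostRareWord words → Spec_getMostRareWord words (getMostRareWord words)

-- ===== LEMMAS AND PROOFS =====

-- running-min fold of a projection: the result is attained (or the seed) and is a lower bound
theorem pv_foldl_min_proj {α β : Type} [LinearOrder β] (l : List α) (f : α → β) (a : β) :
    ((∃ x ∈ l, l.foldl (fun acc x => if f x < acc then f x else acc) a = f x) ∨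
      l.foldl (fun acc x => if f x < acc then f x else acc) a = a) ∧
    l.foldl (fun acc x => if f x < acc then f x else acc) a ≤ a ∧
    ∀ x ∈ l, l.foldl (fun acc x => if f x < acc then f x else acc) a ≤ f x := by
  induction l generalizing a with
  | nil => simp
  | cons y t ih =>
    simp only [List.foldl_cons, List.mem_cons]
    obtain ⟨hmem, hle, hlb⟩ := ih (if f y < a then f y else a)
    refine ⟨?_, ?_, ?_⟩
    · rcases hmem with ⟨x, hx, hex⟩ | heq
      · exact Or.inl ⟨x, Or.inr hx, hex⟩
      · by_cases h : f y < a
        · exact Or.inl ⟨y, Or.inl rfl, by simpa [h] using heq⟩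
        · exact Or.inr (by simpa [h] using heq)
    · exact le_trans hle (by split <;> [exact le_of_lt (by assumption); exact le_rfl])
    · rintro x (rfl | hx)
      · exact le_trans hle (by split <;> [exact le_rfl; exact le_of_not_gt (by assumption)])
      · exact hlb x hx


theorem pv_pyGet0 {α : Type} (xs : List α) : PySem.List.pyGet? xs (0:Int) = xs.head? := by
  cases xs <;> simp [PySem.List.pyGet?, PySem.List.pyIdx?]

theorem pv_head_insertBy {α : Type} (bef : α → α → Bool) (x : α) (acc : List α) :
    (PySem.List.insertBy bef x acc).head? =
      some (match acc.head? with
            | none => x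
            | some y => if bef x y then x else y) := by
  cases acc with
  | nil => simp [PySem.List.insertBy]
  | cons y t => by_cases h : bef x y <;> simp [PySem.List.insertBy, h]

-- head of the insertion-sort fold = a running "first minimum" fold over the same list
theorem pv_head_foldl_insertBy {α : Type} (bef : α → α → Bool) (l : List α) (acc : List α) :
    (l.foldl (fun a x => PySem.List.insertBy bef x a) acc).head? =
      l.foldl (fun b x =>
        some (match b with
              | none => x
              | some y => if bef x y then x else y)) acc.head? := by
  induction l generalizing acc with
  | nil => rfl
  | cons x t ih => simp only [List.foldl_cons, ih, pv_head_insertBy]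

-- a guarded fold is the fold over the filtered list
theorem pv_foldl_guard_filter {α β : Type} (l : List α) (p : α → Bool) (g : β → α → β) (b : β) :
    l.foldl (fun b x => if p x then g b x else b) b = (l.filter p).foldl g b := by
  induction l generalizing b with
  | nil => rfl
  | cons x t ih => by_cases h : p x <;> simp [h, ih]

-- the common "first shortest element so far" step both sides reduce to
def pvStep (b : Option String) (x : String) : Option String :=
  some (match b with
        | none => x
        | some y => if decide (PySem.Str.len x < PySem.Str.len y) = true then x else y)

theorem pv_head_foldl_insertBy_len (l acc : List String) :
    (l.foldl (fun a x =>
        PySem.List.insertBy (fun a b => decide (PySem.Str.len a < PySem.Str.len b)) x a) acc).head? =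
      l.foldl pvStep acc.head? := by
  rw [pv_head_foldl_insertBy]
  apply PySem.List.foldl_congr_mem'
  intro x _ b
  cases b <;> rfl

theorem pv_main_eq (w0 : String) (t : List String) :
    getMostRareWord (w0 :: t) = getMostRareWord_alt (w0 :: t) := by
  have hseed : (PySem.List.pyGet? (w0 :: t) (0:Int)).getD "" = w0 := by
    simp
  set ws := w0 :: t with hws
  set cnt : String → Nat := fun w => PySem.List.count ws w with hcnt
  set M : Nat := ws.foldl (fun c w => if cnt w < c then cnt w else c) (cnt w0) with hM
  set counts := ws.foldl (fun d w => d.insert w (d.getD w 0 + 1)) (PySem.Dict.empty : PySem.Dict String Int) with hcounts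
  have hgetD : ∀ v, counts.getD v 0 = (cnt v : Int) := by
    intro v
    simpa using PySem.Dict.getD_foldl_insert_add_one ws PySem.Dict.empty v
  have hvalues : counts.values = (PySem.Set.ofList ws).map (fun k => (cnt k : Int)) := by
    rw [hcounts, PySem.Dict.foldl_insert_getD_add_one_eq_counter]
    show (PySem.Dict.counter ws).items.map Prod.snd = _
    rw [PySem.Dict.items_counter, List.map_map]
    rfl
  have hrarest : counts.values.foldl (fun r c => if c < r then c else r) (counts.getD w0 0) = (M : Int) := by
    rw [hgetD w0]
    obtain ⟨hattA, hleA, hlbA⟩ := pv_foldl_min_proj ws cnt (cnt w0)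
    obtain ⟨hattB, hleB, hlbB⟩ := pv_foldl_min_proj counts.values (fun c => c) ((cnt w0 : Int))
    rw [← hM] at hattA hleA hlbA
    have hAex : ∃ x ∈ ws, M = cnt x := by
      rcases hattA with ⟨x, hx, hex⟩ | heq
      · exact ⟨x, hx, hex⟩
      · exact ⟨w0, by simp [hws], heq⟩
    apply le_antisymm
    · obtain ⟨x, hx, hex⟩ := hAex
      have hmem : (cnt x : Int) ∈ counts.values := by
        rw [hvalues]
        exact List.mem_map.mpr ⟨x, (PySem.Set.mem_ofList ws x).mpr hx, rfl⟩
      calc _ ≤ (cnt x : Int) := hlbB _ hmem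
        _ = (M : Int) := by rw [hex]
    · rcases hattB with ⟨c, hc, hec⟩ | heq
      · rw [hvalues] at hc
        obtain ⟨x, hx, rfl⟩ := List.mem_map.mp hc
        rw [hec]
        exact_mod_cast hlbA x ((PySem.Set.mem_ofList ws x).mp hx)
      · rw [heq]
        exact_mod_cast hleA
  have hA : getMostRareWord ws = ((ws.filter (fun w => cnt w == M)).foldl pvStep none).getD "" := by
    unfold getMostRareWord sortWords
    simp only [hseed]
    rw [PySem.List.foldl_append_if_eq_filter, pv_pyGet0, PySem.List.sorted_eq_foldl_insertBy,
      pv_head_foldl_insertBy_len, List.nil_append]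
    simp only [hcnt, hM]
    rw [List.head?_nil]
  have hB : getMostRareWord_alt ws = ((ws.filter (fun w => cnt w == M)).foldl pvStep none).getD "" := by
    show ((ws.foldl (fun best w =>
        if counts.getD w 0 == counts.values.foldl (fun r c => if c < r then c else r) (counts.getD ((PySem.List.pyGet? ws 0).getD "") 0) then
          match best with
          | none => some w
          | some v => if PySem.Str.len w < PySem.Str.len v then some w else best
        else best) none).getD "") = _
    rw [hseed]
    have hcond : ∀ (best : Option String) (w : String),
        (if counts.getD w 0 == counts.values.foldl (fun r c => if c < r then c else r) (counts.getD w0 0) then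
          match best with
          | none => some w
          | some v => if PySem.Str.len w < PySem.Str.len v then some w else best
        else best) =
        (if cnt w == M then pvStep best w else best) := by
      intro best w
      rw [hrarest, hgetD]
      have : ((cnt w : Int) == (M : Int)) = (cnt w == M) := by
        by_cases h : cnt w = M <;> simp [h]
      rw [this]
      cases best with
      | none => rfl
      | some v => simp only [pvStep, decide_eq_true_eq]; split_ifs <;> rfl
    calc (ws.foldl _ none).getD "" = ((ws.foldl (fun best w =>
          if cnt w == M then pvStep best w else best) none).getD "") := by
            congr 1
            exact PySem.List.foldl_congr_mem' ws _ _ none (fun x hx acc => hcond acc x)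
      _ = _ := by rw [pv_foldl_guard_filter]
  rw [hA, hB]

-- ===== VERDICT (by name: the statement is the Claim_ definition above) =====
theorem getMostRareWord_spec : Claim_equal_getMostRareWord := by
  intro words _ hpre
  cases words with
  | nil => exact absurd rfl hpre
  | cons w0 t => exact pv_main_eq w0 t
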